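-- pv_equiv track=rewrite | github.com/santilondono/flyon-yiwu-market | yiwu_app/models/product_state.py | _parse_measurement
-- ===== SOURCE A (Python) =====
-- def _parse_measurement(m: str):
--     """Parse '3m*15mm*2cm' back into 3 value+unit pairs."""
--     units = ["mm", "cm", "inch", "ft", "m"]
--     parts = m.split("*") if m else []
--     result = []
--     for part in parts[:3]:
--         part = part.strip()
--         matched_unit = "cm"
--         matched_val = part
--         for u in sorted(units, key=len, reverse=True):
--             if part.lower().endswith(u):
--                 matched_unit = u
--                 matched_val = part[:-len(u)]
--                 break
--         result.append((matched_val, matched_unit))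
--     while len(result) < 3:
--         result.append(("", "cm"))
--     return result
-- ===== SOURCE B (Python) =====
-- UNITS = ("inch", "mm", "cm", "ft", "m")
--
-- def _split_unit(p):
--     """Cut p at the earliest position whose (lowercased) suffix is a known unit:
--     the earliest cut is the longest valid unit suffix."""
--     low = p.lower()
--     for i in range(len(low) + 1):
--         if low[i:] in UNITS:
--             return (p[:i], low[i:])
--     return (p, "cm")
--
-- def _parse_measurement(m: str):
--     parts = [p.strip() for p in (m.split("*") if m else [])[:3]]
--     parts += [""] * (3 - len(parts))
--     return [_split_unit(p) for p in parts]
-- ===== Notes on version B (the rewrite author's own statement) =====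
-- stated objective: simpler
-- what changed: Replaces the per-part scan over the length-sorted unit list with endswith tests by a single left-to-right cut-position scan (earliest cut whose lowercased suffix is in the unit set = longest unit suffix), and replaces the append-then-while padding with building the padded 3-part list up front and mapping one splitter over it.
import Mathlib
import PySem

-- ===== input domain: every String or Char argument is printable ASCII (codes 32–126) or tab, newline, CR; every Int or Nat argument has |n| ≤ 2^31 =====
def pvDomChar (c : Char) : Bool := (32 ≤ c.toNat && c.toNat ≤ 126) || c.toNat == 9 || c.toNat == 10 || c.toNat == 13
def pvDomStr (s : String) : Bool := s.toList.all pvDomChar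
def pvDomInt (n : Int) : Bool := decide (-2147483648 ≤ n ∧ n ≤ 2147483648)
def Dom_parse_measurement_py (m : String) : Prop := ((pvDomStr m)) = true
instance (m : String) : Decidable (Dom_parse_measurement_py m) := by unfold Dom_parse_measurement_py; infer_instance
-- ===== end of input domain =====

-- B replaces the per-part endswith scan over the length-sorted unit list by a single
-- left-to-right cut-position scan (earliest cut whose lowercased suffix is a unit),
-- and builds the padded 3-part list up front instead of append-then-while padding.

-- ===== PORT A =====
def unitsA : List String := ["mm", "cm", "inch", "ft", "m"]

-- the inner 'for u in sorted(units, …): if part.lower().endswith(u): …; break' loop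
def findA (p : String) : List String → String × String
  | [] => (p, "cm")
  | u :: rest =>
    if PySem.Str.endswith (PySem.Str.lower p) u then
      (PySem.Str.slice p none (some (-(PySem.Str.len u))), u)
    else findA p rest

-- the 'while len(result) < 3: result.append(("", "cm"))' loop
def padA (res : List (String × String)) : List (String × String) :=
  if res.length < 3 then padA (res ++ [("", "cm")]) else res
termination_by 3 - res.length
decreasing_by simp; omega

def parse_measurement_py (m : String) : List (String × String) :=
  let parts := if m = "" then [] else (PySem.Str.split? m "*").getD []
  let result := (PySem.List.slice parts none (some 3)).foldl
    (fun res part =>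
      let part := PySem.Str.strip part
      res ++ [findA part (PySem.List.sorted unitsA (fun u => PySem.Str.len u) true)]) []
  padA result

-- ===== PORT B =====
def unitsB : List String := ["inch", "mm", "cm", "ft", "m"]

-- the 'for i in range(len(low) + 1): if low[i:] in UNITS: return …' loop
def goB (p low : String) : List Int → String × String
  | [] => (p, "cm")
  | i :: rest =>
    if PySem.Str.slice low (some i) none ∈ unitsB then
      (PySem.Str.slice p none (some i), PySem.Str.slice low (some i) none)
    else goB p low rest

def splitUnit (p : String) : String × String :=
  let low := PySem.Str.lower p
  goB p low (PySem.List.pyRange 0 (PySem.Str.len low + 1) 1)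

def parse_measurement_py_alt (m : String) : List (String × String) :=
  let parts := (PySem.List.slice (if m = "" then [] else (PySem.Str.split? m "*").getD []) none (some 3)).map PySem.Str.strip
  let padded := parts ++ List.replicate (3 - parts.length) ""
  padded.map splitUnit

-- ===== PRECONDITION & SPEC =====
def Spec_parse_measurement_py (m : String) (out : List (String × String)) : Prop := out = parse_measurement_py_alt m
instance (m : String) (out : List (String × String)) : Decidable (Spec_parse_measurement_py m out) := by unfold Spec_parse_measurement_py; infer_instance

-- ===== CLAIM (what is proved, stated in full; the proofs are below) =====
def Claim_equal_parse_measurement_py : Prop := ∀ (m : String), Dom_parse_measurement_py m → Spec_parse_measurement_py m (parse_measurement_py m)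

-- ===== LEMMAS AND PROOFS =====

theorem sorted_unitsA :
    PySem.List.sorted unitsA (fun u => PySem.Str.len u) true = unitsB := by decide

theorem ew_iff (p u : String) :
    PySem.Str.endswith (PySem.Str.lower p) u = true ↔ u.toList <:+ (PySem.Str.lower p).toList := by
  rw [PySem.Str.endswith_eq, PySem.Chars.endswith_iff]

theorem length_low (p : String) : (PySem.Str.lower p).toList.length = p.toList.length := by
  rw [PySem.Str.toList_lower]; simp [PySem.Chars.lower]

theorem slice_low_toList (p : String) (i : Int) (h0 : 0 ≤ i) :
    (PySem.Str.slice (PySem.Str.lower p) (some i) none).toList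
      = (PySem.Str.lower p).toList.drop i.toNat := by
  rw [PySem.Str.toList_slice, PySem.Chars.slice_eq_listSlice, PySem.List.slice_from _ h0]

theorem drop_of_suffix (l s : List Char) (h : s <:+ l) : l.drop (l.length - s.length) = s := by
  obtain ⟨t, rfl⟩ := h
  have ht : (t ++ s).length - s.length = t.length := by simp
  rw [ht, List.drop_left]

-- membership of a dropped suffix in the unit list forces one of the five units to be
-- a suffix of the lowered string, at the matching length
theorem mem_slice_char (p : String) (i : Int) (h0 : 0 ≤ i)
    (hmem : PySem.Str.slice (PySem.Str.lower p) (some i) none ∈ unitsB) :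
    ("inch".toList <:+ (PySem.Str.lower p).toList ∧ i.toNat + 4 = p.toList.length) ∨
    ("mm".toList <:+ (PySem.Str.lower p).toList ∧ i.toNat + 2 = p.toList.length) ∨
    ("cm".toList <:+ (PySem.Str.lower p).toList ∧ i.toNat + 2 = p.toList.length) ∨
    ("ft".toList <:+ (PySem.Str.lower p).toList ∧ i.toNat + 2 = p.toList.length) ∨
    ("m".toList <:+ (PySem.Str.lower p).toList ∧ i.toNat + 1 = p.toList.length) := by
  have hS := slice_low_toList p i h0
  have hlen := length_low p
  have key : ∀ u : String, PySem.Str.slice (PySem.Str.lower p) (some i) none = u →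
      u.toList <:+ (PySem.Str.lower p).toList ∧
        (PySem.Str.lower p).toList.length - i.toNat = u.toList.length := by
    intro u h
    have hd := congrArg String.toList h
    rw [hS] at hd
    refine ⟨hd ▸ List.drop_suffix i.toNat _, ?_⟩
    have hL := congrArg List.length hd
    simpa using hL
  have hmem' : PySem.Str.slice (PySem.Str.lower p) (some i) none = "inch" ∨
      PySem.Str.slice (PySem.Str.lower p) (some i) none = "mm" ∨
      PySem.Str.slice (PySem.Str.lower p) (some i) none = "cm" ∨
      PySem.Str.slice (PySem.Str.lower p) (some i) none = "ft" ∨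
      PySem.Str.slice (PySem.Str.lower p) (some i) none = "m" := by
    simpa [unitsB] using hmem
  rcases hmem' with h | h | h | h | h
  · obtain ⟨hs, hL⟩ := key _ h
    have hl4 : ("inch" : String).toList.length = 4 := by decide
    exact Or.inl ⟨hs, by rw [hl4] at hL; omega⟩
  · obtain ⟨hs, hL⟩ := key _ h
    have hl2 : ("mm" : String).toList.length = 2 := by decide
    exact Or.inr (Or.inl ⟨hs, by rw [hl2] at hL; omega⟩)
  · obtain ⟨hs, hL⟩ := key _ h
    have hl2 : ("cm" : String).toList.length = 2 := by decide
    exact Or.inr (Or.inr (Or.inl ⟨hs, by rw [hl2] at hL; omega⟩))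
  · obtain ⟨hs, hL⟩ := key _ h
    have hl2 : ("ft" : String).toList.length = 2 := by decide
    exact Or.inr (Or.inr (Or.inr (Or.inl ⟨hs, by rw [hl2] at hL; omega⟩)))
  · obtain ⟨hs, hL⟩ := key _ h
    have hl1 : ("m" : String).toList.length = 1 := by decide
    exact Or.inr (Or.inr (Or.inr (Or.inr ⟨hs, by rw [hl1] at hL; omega⟩)))

theorem goB_append_miss (p low : String) (l1 l2 : List Int)
    (h : ∀ i ∈ l1, PySem.Str.slice low (some i) none ∉ unitsB) :
    goB p low (l1 ++ l2) = goB p low l2 := by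
  induction l1 with
  | nil => rfl
  | cons i l ih =>
    rw [List.cons_append, goB, if_neg (h i (by simp))]
    exact ih (fun j hj => h j (by simp [hj]))

theorem splitUnit_hit (p : String) (k : Nat) (hk : 0 < k) (hkn : k ≤ p.toList.length)
    (hmiss : ∀ i : Int, 0 ≤ i → i < (p.toList.length : Int) - k →
      PySem.Str.slice (PySem.Str.lower p) (some i) none ∉ unitsB)
    (hhit : PySem.Str.slice (PySem.Str.lower p) (some ((p.toList.length : Int) - k)) none ∈ unitsB) :
    splitUnit p = (PySem.Str.slice p none (some ((p.toList.length : Int) - k)),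
                   PySem.Str.slice (PySem.Str.lower p) (some ((p.toList.length : Int) - k)) none) := by
  unfold splitUnit
  dsimp only
  have hlen' : PySem.Str.len (PySem.Str.lower p) = (p.toList.length : Int) := by
    rw [PySem.Str.len_eq, length_low]
  rw [hlen']
  rw [PySem.List.pyRange_one_append 0 ((p.toList.length : Int) - k) ((p.toList.length : Int) + 1)
      (by omega) (by omega)]
  rw [goB_append_miss _ _ _ _
      (fun i hi => hmiss i (PySem.List.mem_pyRange_one.mp hi).1 (PySem.List.mem_pyRange_one.mp hi).2)]
  rw [PySem.List.pyRange_one_cons (by omega)]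
  rw [goB, if_pos hhit]

theorem splitUnit_miss (p : String)
    (hmiss : ∀ i : Int, 0 ≤ i →
      PySem.Str.slice (PySem.Str.lower p) (some i) none ∉ unitsB) :
    splitUnit p = (p, "cm") := by
  unfold splitUnit
  dsimp only
  have hlen' : PySem.Str.len (PySem.Str.lower p) = (p.toList.length : Int) := by
    rw [PySem.Str.len_eq, length_low]
  rw [hlen']
  rw [← List.append_nil (PySem.List.pyRange 0 ((p.toList.length : Int) + 1) 1)]
  rw [goB_append_miss _ _ _ _
      (fun i hi => hmiss i (PySem.List.mem_pyRange_one.mp hi).1)]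
  rfl

theorem leaf_hit (p u : String) (k : Nat) (hk : u.toList.length = k) (hkpos : 0 < k)
    (hu : u ∈ unitsB)
    (hsuf : u.toList <:+ (PySem.Str.lower p).toList)
    (hmiss : ∀ i : Int, 0 ≤ i → i < (p.toList.length : Int) - k →
      PySem.Str.slice (PySem.Str.lower p) (some i) none ∉ unitsB) :
    splitUnit p = (PySem.Str.slice p none (some (-(k : Int))), u) := by
  have hlen := length_low p
  have hkn : k ≤ p.toList.length := by
    have := hsuf.length_le; omega
  have hdrop : (PySem.Str.lower p).toList.drop (p.toList.length - k) = u.toList := by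
    have := drop_of_suffix _ _ hsuf
    rw [hlen, hk] at this
    exact this
  have hSu : PySem.Str.slice (PySem.Str.lower p) (some ((p.toList.length : Int) - k)) none = u := by
    apply String.toList_inj.mp
    rw [slice_low_toList p _ (by omega)]
    have ht : ((p.toList.length : Int) - k).toNat = p.toList.length - k := by omega
    rw [ht, hdrop]
  have hhit : PySem.Str.slice (PySem.Str.lower p) (some ((p.toList.length : Int) - k)) none ∈ unitsB := by
    rw [hSu]; exact hu
  rw [splitUnit_hit p k hkpos hkn hmiss hhit, hSu]
  congr 1
  apply String.toList_inj.mp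
  rw [PySem.Str.toList_slice, PySem.Chars.slice_eq_listSlice, PySem.Str.toList_slice,
      PySem.Chars.slice_eq_listSlice]
  rw [PySem.List.slice_to _ (by omega : (0:Int) ≤ (p.toList.length : Int) - k)]
  rw [PySem.List.slice_to_neg_natCast _ k hkpos]
  congr 1
  omega

theorem inner_eq (p : String) :
    findA p (PySem.List.sorted unitsA (fun u => PySem.Str.len u) true) = splitUnit p := by
  rw [sorted_unitsA]
  have l4 : PySem.Str.len "inch" = ((4:Nat) : Int) := by decide
  have l2m : PySem.Str.len "mm" = ((2:Nat) : Int) := by decide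
  have l2c : PySem.Str.len "cm" = ((2:Nat) : Int) := by decide
  have l2f : PySem.Str.len "ft" = ((2:Nat) : Int) := by decide
  have l1 : PySem.Str.len "m" = ((1:Nat) : Int) := by decide
  simp only [unitsB, findA]
  by_cases h4 : PySem.Str.endswith (PySem.Str.lower p) "inch" = true
  · rw [if_pos h4, l4]
    refine (leaf_hit p "inch" 4 (by decide) (by norm_num) (by simp [unitsB])
      ((ew_iff p "inch").mp h4) ?_).symm
    intro i h0 hi hmem
    rcases mem_slice_char p i h0 hmem with ⟨_, h⟩ | ⟨_, h⟩ | ⟨_, h⟩ | ⟨_, h⟩ | ⟨_, h⟩ <;> omega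
  · rw [if_neg h4]
    have n4 : ¬ ("inch".toList <:+ (PySem.Str.lower p).toList) :=
      fun hs => h4 ((ew_iff p "inch").mpr hs)
    by_cases hmm : PySem.Str.endswith (PySem.Str.lower p) "mm" = true
    · rw [if_pos hmm, l2m]
      refine (leaf_hit p "mm" 2 (by decide) (by norm_num) (by simp [unitsB])
        ((ew_iff p "mm").mp hmm) ?_).symm
      intro i h0 hi hmem
      rcases mem_slice_char p i h0 hmem with ⟨hs, h⟩ | ⟨_, h⟩ | ⟨_, h⟩ | ⟨_, h⟩ | ⟨_, h⟩ <;>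
        first | exact n4 hs | omega
    · rw [if_neg hmm]
      have nmm : ¬ ("mm".toList <:+ (PySem.Str.lower p).toList) :=
        fun hs => hmm ((ew_iff p "mm").mpr hs)
      by_cases hcm : PySem.Str.endswith (PySem.Str.lower p) "cm" = true
      · rw [if_pos hcm, l2c]
        refine (leaf_hit p "cm" 2 (by decide) (by norm_num) (by simp [unitsB])
          ((ew_iff p "cm").mp hcm) ?_).symm
        intro i h0 hi hmem
        rcases mem_slice_char p i h0 hmem with ⟨hs, h⟩ | ⟨hs, h⟩ | ⟨_, h⟩ | ⟨_, h⟩ | ⟨_, h⟩ <;>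
          first | exact n4 hs | exact nmm hs | omega
      · rw [if_neg hcm]
        have ncm : ¬ ("cm".toList <:+ (PySem.Str.lower p).toList) :=
          fun hs => hcm ((ew_iff p "cm").mpr hs)
        by_cases hft : PySem.Str.endswith (PySem.Str.lower p) "ft" = true
        · rw [if_pos hft, l2f]
          refine (leaf_hit p "ft" 2 (by decide) (by norm_num) (by simp [unitsB])
            ((ew_iff p "ft").mp hft) ?_).symm
          intro i h0 hi hmem
          rcases mem_slice_char p i h0 hmem with ⟨hs, h⟩ | ⟨hs, h⟩ | ⟨hs, h⟩ | ⟨_, h⟩ | ⟨_, h⟩ <;>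
            first | exact n4 hs | exact nmm hs | exact ncm hs | omega
        · rw [if_neg hft]
          have nft : ¬ ("ft".toList <:+ (PySem.Str.lower p).toList) :=
            fun hs => hft ((ew_iff p "ft").mpr hs)
          by_cases hm : PySem.Str.endswith (PySem.Str.lower p) "m" = true
          · rw [if_pos hm, l1]
            refine (leaf_hit p "m" 1 (by decide) (by norm_num) (by simp [unitsB])
              ((ew_iff p "m").mp hm) ?_).symm
            intro i h0 hi hmem
            rcases mem_slice_char p i h0 hmem with ⟨hs, h⟩ | ⟨hs, h⟩ | ⟨hs, h⟩ | ⟨hs, h⟩ | ⟨_, h⟩ <;>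
              first | exact n4 hs | exact nmm hs | exact ncm hs | exact nft hs | omega
          · rw [if_neg hm]
            have nm : ¬ ("m".toList <:+ (PySem.Str.lower p).toList) :=
              fun hs => hm ((ew_iff p "m").mpr hs)
            refine (splitUnit_miss p ?_).symm
            intro i h0 hmem
            rcases mem_slice_char p i h0 hmem with ⟨hs, _⟩ | ⟨hs, _⟩ | ⟨hs, _⟩ | ⟨hs, _⟩ | ⟨hs, _⟩ <;>
              first | exact n4 hs | exact nmm hs | exact ncm hs | exact nft hs | exact nm hs

theorem inner_eq' (p : String) :
    findA p (PySem.List.sorted unitsA (fun u => (u.length : Int)) true) = splitUnit p := by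
  have h : (fun u : String => (u.length : Int)) = fun u => PySem.Str.len u := by
    funext u; simp [PySem.Str.len_eq]
  rw [h, inner_eq]

theorem padA_eq (res : List (String × String)) :
    padA res = res ++ List.replicate (3 - res.length) ("", "cm") := by
  suffices h : ∀ (fuel : Nat) (res : List (String × String)), 3 - res.length = fuel →
      padA res = res ++ List.replicate (3 - res.length) ("", "cm") from h _ res rfl
  intro fuel
  induction fuel with
  | zero =>
    intro res h
    rw [padA, if_neg (by omega)]
    simp [show 3 - res.length = 0 from h]
  | succ n ih =>
    intro res h
    have hlt : res.length < 3 := by omega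
    rw [padA, if_pos hlt, ih (res ++ [("", "cm")]) (by simp; omega)]
    simp only [List.length_append, List.length_cons, List.length_nil]
    rw [List.append_assoc, List.singleton_append, ← List.replicate_succ]
    congr 2
    omega

theorem splitUnit_empty : splitUnit "" = ("", "cm") := by decide

-- ===== VERDICT (by name: the statement is the Claim_ definition above) =====
theorem parse_measurement_py_spec : Claim_equal_parse_measurement_py := by
  intro m _
  unfold Spec_parse_measurement_py parse_measurement_py parse_measurement_py_alt
  generalize (if m = "" then [] else (PySem.Str.split? m "*").getD []) = ps
  dsimp only
  rw [PySem.List.slice_to ps (by norm_num : (0:Int) ≤ 3)]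
  have h3 : ((3:Int)).toNat = 3 := rfl
  rw [h3]
  match ps with
  | [] => simp [padA_eq, splitUnit_empty]
  | [a] => simp [padA_eq, splitUnit_empty, inner_eq']
  | [a, b] => simp [padA_eq, splitUnit_empty, inner_eq']
  | a :: b :: c :: t => simp [padA_eq, inner_eq']
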